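-- pv_equiv track=rewrite | github.com/DongLieu/ZK | python_zk/draft-plonk/plonk.py | build_sigma_map
-- ===== SOURCE A (Python) =====
-- from typing import Dict, List, Tuple
--
-- COLUMNS = ("w_L", "w_R", "w_O")
--
-- def build_sigma_map(
--     wire_labels: Dict[str, List[str]]
-- ) -> Dict[str, List[Tuple[str, int]]]:
--     sigma: Dict[str, List[Tuple[str, int]]] = {
--         col: [("", 0)] * len(rows) for col, rows in wire_labels.items()
--     }
--     occurrences: Dict[str, List[Tuple[str, int]]] = {}
--     for col in COLUMNS:
--         for row, label in enumerate(wire_labels[col]):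
--             occurrences.setdefault(label, []).append((col, row))
--     for cycle in occurrences.values():
--         if len(cycle) == 1:
--             col, row = cycle[0]
--             sigma[col][row] = (col, row)
--             continue
--         for idx, (col, row) in enumerate(cycle):
--             sigma[col][row] = cycle[(idx + 1) % len(cycle)]
--     return sigma
-- ===== SOURCE B (Python) =====
-- COLUMNS = ("w_L", "w_R", "w_O")
--
-- def build_sigma_map(wire_labels):
--     # One pass over the wire positions: link each occurrence of a label to the
--     # next one as soon as it is seen (first/prev bookkeeping), then close each
--     # chain into a cycle by pointing the last occurrence back at the first.
--     sigma = {col: [("", 0)] * len(rows) for col, rows in wire_labels.items()}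
--     first = {}
--     prev = {}
--     for col in COLUMNS:
--         for row, label in enumerate(wire_labels[col]):
--             if label in prev:
--                 pc, pr = prev[label]
--                 sigma[pc][pr] = (col, row)
--             else:
--                 first[label] = (col, row)
--             prev[label] = (col, row)
--     for label, (pc, pr) in prev.items():
--         sigma[pc][pr] = first[label]
--     return sigma
-- ===== Notes on version B (the rewrite author's own statement) =====
-- stated objective: alternative
-- what changed: Instead of grouping all occurrences of each label into cycle lists and then linking each cycle in a second pass, B links occurrences incrementally in a single pass over the wire positions using first/prev bookkeeping dicts, closing each chain into a cycle afterwards.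
import Mathlib
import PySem

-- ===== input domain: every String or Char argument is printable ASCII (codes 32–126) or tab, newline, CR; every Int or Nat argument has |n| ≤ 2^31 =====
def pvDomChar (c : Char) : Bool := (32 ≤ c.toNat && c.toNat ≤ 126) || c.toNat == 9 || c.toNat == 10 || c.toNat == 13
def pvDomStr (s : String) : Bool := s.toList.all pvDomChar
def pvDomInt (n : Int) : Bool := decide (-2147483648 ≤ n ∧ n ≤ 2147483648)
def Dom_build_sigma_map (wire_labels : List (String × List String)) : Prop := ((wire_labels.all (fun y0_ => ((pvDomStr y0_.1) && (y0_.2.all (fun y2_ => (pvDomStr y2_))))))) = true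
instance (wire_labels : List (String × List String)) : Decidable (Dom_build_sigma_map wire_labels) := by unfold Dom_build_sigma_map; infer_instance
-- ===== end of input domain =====

-- B replaces A's two-pass build (group all occurrences of each label into cycle lists, then
-- link every cycle) by a single incremental pass with first/prev bookkeeping dicts; same
-- results, alternative decomposition (no speed claim).

def pyCOLUMNS : List String := ["w_L", "w_R", "w_O"]

-- ===== PORT A =====
def build_sigma_map (wire_labels : List (String × List String)) : List (String × List (String × Int)) :=
  let wl : PySem.Dict String (List String) := PySem.Dict.mk wire_labels
  -- {col: [("", 0)] * len(rows) for col, rows in wire_labels.items()}  (keys unique under Pre_)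
  let sigma0 : PySem.Dict String (List (String × Int)) :=
    PySem.Dict.mk (wire_labels.map (fun p => (p.1, List.replicate p.2.length ("", 0))))
  -- occurrences.setdefault(label, []).append((col, row)); wire_labels[col] is present under Pre_
  let occurrences : PySem.Dict String (List (String × Int)) :=
    pyCOLUMNS.foldl (fun occ col =>
      (PySem.List.enumerate (wl.getD col [])).foldl (fun occ rl =>
        occ.modify rl.2 [] (fun c => c ++ [(col, rl.1)])) occ) PySem.Dict.empty
  -- cycle linking; sigma[col][row] = v: col is a key and 0 ≤ row < len(sigma[col]), so
  -- modify + List.set row.toNat is exact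
  let sigma :=
    occurrences.values.foldl (fun sigma cycle =>
      if cycle.length == 1 then
        let p := PySem.List.pyGetD cycle 0 ("", 0)
        sigma.modify p.1 [] (fun rowL => rowL.set p.2.toNat p)
      else
        (PySem.List.enumerate cycle).foldl (fun sigma ip =>
          sigma.modify ip.2.1 [] (fun rowL =>
            rowL.set ip.2.2.toNat
              (PySem.List.pyGetD cycle (PySem.Int.mod (ip.1 + 1) (cycle.length : Int)) ("", 0)))) sigma)
      sigma0
  sigma.items

-- ===== PORT B =====
def build_sigma_map_alt (wire_labels : List (String × List String)) : List (String × List (String × Int)) :=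
  let wl : PySem.Dict String (List String) := PySem.Dict.mk wire_labels
  let sigma0 : PySem.Dict String (List (String × Int)) :=
    PySem.Dict.mk (wire_labels.map (fun p => (p.1, List.replicate p.2.length ("", 0))))
  -- one pass: on a repeated label link the previous occurrence to the current one
  let st :=
    pyCOLUMNS.foldl (fun st col =>
      (PySem.List.enumerate (wl.getD col [])).foldl (fun st rl =>
        match st.2.2.get? rl.2 with
        | some q =>
            (st.1.modify q.1 [] (fun rowL => rowL.set q.2.toNat (col, rl.1)),
             st.2.1, st.2.2.insert rl.2 (col, rl.1))
        | none =>
            (st.1, st.2.1.insert rl.2 (col, rl.1), st.2.2.insert rl.2 (col, rl.1))) st)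
      (sigma0, (PySem.Dict.empty : PySem.Dict String (String × Int)),
       (PySem.Dict.empty : PySem.Dict String (String × Int)))
  -- close every chain into a cycle: sigma[prev[label]] = first[label]
  -- (label is always a key of first here, so getD is exact)
  let sigma :=
    st.2.2.items.foldl (fun sigma lp =>
      sigma.modify lp.2.1 [] (fun rowL => rowL.set lp.2.2.toNat (st.2.1.getD lp.1 ("", 0)))) st.1
  sigma.items

-- ===== PRECONDITION & SPEC =====
-- Pre_ excludes association lists with duplicate keys (they cannot arise from the Python dict
-- argument; the collapsed dict A sees would disagree with first-match lookup) and inputs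
-- missing one of the three COLUMNS keys, on which A raises KeyError.
def Pre_build_sigma_map (wire_labels : List (String × List String)) : Prop :=
  (wire_labels.map Prod.fst).Nodup ∧ ∀ c ∈ pyCOLUMNS, c ∈ wire_labels.map Prod.fst
instance (wire_labels : List (String × List String)) : Decidable (Pre_build_sigma_map wire_labels) := by
  unfold Pre_build_sigma_map; infer_instance

def pvWitness_build_sigma_map : (List (String × List String)) :=
  [("w_L", ["a", "b"]), ("w_R", ["a", "c"]), ("w_O", ["b", "a"])]

def Spec_build_sigma_map (wire_labels : List (String × List String)) (out : List (String × List (String × Int))) : Prop := out = build_sigma_map_alt wire_labels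
instance (wire_labels : List (String × List String)) (out : List (String × List (String × Int))) : Decidable (Spec_build_sigma_map wire_labels out) := by unfold Spec_build_sigma_map; infer_instance

-- ===== CLAIM (what is proved, stated in full; the proofs are below) =====
def Claim_equal_build_sigma_map : Prop := ∀ (wire_labels : List (String × List String)), Dom_build_sigma_map wire_labels → Pre_build_sigma_map wire_labels → Spec_build_sigma_map wire_labels (build_sigma_map wire_labels)

-- ===== LEMMAS AND PROOFS =====

-- position key (column, row-as-Nat); all rows come from enumerate and are ≥ 0
def pvKey (p : String × Int) : String × Nat := (p.1, p.2.toNat)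

-- pure row update on the items list: set entry e.2 at position e.1
def updRow (L : List (String × List (String × Int))) (e : (String × Int) × (String × Int)) :
    List (String × List (String × Int)) :=
  L.map (fun p => if p.1 == e.1.1 then (p.1, p.2.set e.1.2.toNat e.2) else p)

def applyE (L : List (String × List (String × Int)))
    (es : List ((String × Int) × (String × Int))) : List (String × List (String × Int)) :=
  es.foldl updRow L

-- traversal of the three columns as one flat list of (position, label)
def flatL (wl : PySem.Dict String (List String)) : List ((String × Int) × String) :=
  pyCOLUMNS.flatMap (fun col =>
    (PySem.List.enumerate (wl.getD col [])).map (fun rl => ((col, rl.1), rl.2)))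

def labsOf (H : List ((String × Int) × String)) : List String :=
  PySem.Set.ofList (H.map Prod.snd)

def occof (H : List ((String × Int) × String)) (l : String) : List (String × Int) :=
  (H.filter (fun pl => pl.2 == l)).map Prod.fst

def groupedL (H : List ((String × Int) × String)) : List ((String × Int) × (String × Int)) :=
  (labsOf H).flatMap (fun l => (occof H l).zip (occof H l).tail)

def wrapL (H : List ((String × Int) × String)) : List ((String × Int) × (String × Int)) :=
  (labsOf H).map (fun l => ((occof H l).getLastD ("", 0), (occof H l).headD ("", 0)))

def pvFirstD (H : List ((String × Int) × String)) : PySem.Dict String (String × Int) :=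
  PySem.Dict.mk ((labsOf H).map (fun l => (l, (occof H l).headD ("", 0))))

def pvPrevD (H : List ((String × Int) × String)) : PySem.Dict String (String × Int) :=
  PySem.Dict.mk ((labsOf H).map (fun l => (l, (occof H l).getLastD ("", 0))))

def cyclePairs (c : List (String × Int)) : List ((String × Int) × (String × Int)) :=
  (PySem.List.enumerate c).map (fun ip =>
    (ip.2, PySem.List.pyGetD c (PySem.Int.mod (ip.1 + 1) (c.length : Int)) ("", 0)))

-- the assignments B's main pass performs, in order, after history h
def esOf (h H : List ((String × Int) × String)) : List ((String × Int) × (String × Int)) :=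
  match H with
  | [] => []
  | x :: t =>
      (if x.2 ∈ labsOf h then [((occof h x.2).getLastD ("", 0), x.1)] else [])
        ++ esOf (h ++ [x]) t

-- B's loop body over a flat (position, label) entry
def stepB (st : PySem.Dict String (List (String × Int)) × PySem.Dict String (String × Int)
      × PySem.Dict String (String × Int)) (pl : (String × Int) × String) :
    PySem.Dict String (List (String × Int)) × PySem.Dict String (String × Int)
      × PySem.Dict String (String × Int) :=
  match st.2.2.get? pl.2 with
  | some q =>
      (st.1.modify q.1 [] (fun rowL => rowL.set q.2.toNat pl.1),
       st.2.1, st.2.2.insert pl.2 pl.1)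
  | none => (st.1, st.2.1.insert pl.2 pl.1, st.2.2.insert pl.2 pl.1)

-- ---- tiny list helpers ----

theorem headD_append_left {α : Type} {c : List α} (hc : c ≠ []) (t : List α) (d : α) :
    (c ++ t).headD d = c.headD d := by
  cases c with
  | nil => exact absurd rfl hc
  | cons a s => rfl

theorem getLastD_mem {α : Type} {c : List α} (hc : c ≠ []) (d : α) : c.getLastD d ∈ c := by
  rw [List.getLastD_eq_getLast?, List.getLast?_eq_some_getLast hc]
  exact List.getLast_mem hc

theorem flatMap_congr_mem {α β : Type} {l : List α} {f g : α → List β}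
    (h : ∀ x ∈ l, f x = g x) : l.flatMap f = l.flatMap g := by
  simp only [List.flatMap]
  exact congrArg List.flatten (List.map_congr_left h)

theorem flatMap_sing_perm {α β : Type} (ks : List α) (g : α → List β) (w : α → β) :
    (ks.flatMap (fun k => g k ++ [w k])).Perm (ks.flatMap g ++ ks.map w) := by
  induction ks with
  | nil => rfl
  | cons k t ih =>
    simp only [List.flatMap_cons, List.map_cons]
    refine List.Perm.trans (List.Perm.append_left (g k ++ [w k]) ih) ?_
    rw [show (g k ++ [w k]) ++ (t.flatMap g ++ t.map w)
        = g k ++ (w k :: (t.flatMap g ++ t.map w)) by simp]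
    rw [show (g k ++ t.flatMap g) ++ (w k :: t.map w)
        = g k ++ (t.flatMap g ++ w k :: t.map w) by simp]
    exact List.Perm.append_left _ List.perm_middle.symm

theorem append_rot_perm {α : Type} (U A V : List α) (e : α) :
    ((U ++ (A ++ V)) ++ [e]).Perm (U ++ ((A ++ [e]) ++ V)) := by
  rw [show (U ++ (A ++ V)) ++ [e] = U ++ (A ++ (V ++ [e])) by simp]
  rw [show U ++ ((A ++ [e]) ++ V) = U ++ (A ++ (e :: V)) by simp]
  exact List.Perm.append_left _ (List.Perm.append_left _ (List.perm_append_singleton _ _))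

-- ---- generic dict lemmas ----

theorem get?_mk_map {β : Type} (ks : List String) (g : String → β) (x : String) :
    (PySem.Dict.mk (ks.map (fun k => (k, g k)))).get? x
      = if x ∈ ks then some (g x) else none := by
  induction ks with
  | nil => simp [PySem.Dict.get?]
  | cons k t ih =>
    simp only [List.map_cons, PySem.Dict.get?_mk_cons, ih]
    by_cases h : k = x
    · subst h; simp
    · simp [h, Ne.symm h]

theorem keys_mk_map {β : Type} (ks : List String) (g : String → β) :
    (PySem.Dict.mk (ks.map (fun k => (k, g k)))).keys = ks := by
  simp only [PySem.Dict.keys, List.map_map]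
  rw [show ((fun (x : String × β) => x.1) ∘ fun k => (k, g k)) = id from rfl, List.map_id]

theorem insert_mk_map_mem {β : Type} (ks : List String) (g : String → β) {x : String} (v : β)
    (hx : x ∈ ks) :
    (PySem.Dict.mk (ks.map (fun k => (k, g k)))).insert x v
      = PySem.Dict.mk (ks.map (fun k => (k, if k = x then v else g k))) := by
  have hc : (PySem.Dict.mk (ks.map (fun k => (k, g k)))).contains x = true := by
    rw [PySem.Dict.contains_iff_mem_keys, keys_mk_map]; exact hx
  apply PySem.Dict.ext
  rw [PySem.Dict.items_insert_of_contains _ _ hc]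
  show List.map _ (List.map _ _) = _
  rw [List.map_map]
  apply List.map_congr_left
  intro k _
  by_cases h : k = x
  · subst h; simp
  · simp [Function.comp, h]

theorem insert_mk_map_not_mem {β : Type} (ks : List String) (g : String → β) {x : String} (v : β)
    (hx : x ∉ ks) :
    (PySem.Dict.mk (ks.map (fun k => (k, g k)))).insert x v
      = PySem.Dict.mk ((ks ++ [x]).map (fun k => (k, if k = x then v else g k))) := by
  have hc : (PySem.Dict.mk (ks.map (fun k => (k, g k)))).contains x = false := by
    rw [← Bool.not_eq_true, PySem.Dict.contains_iff_mem_keys, keys_mk_map]; exact hx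
  apply PySem.Dict.ext
  rw [PySem.Dict.items_insert_of_not_contains _ _ hc]
  show List.map _ _ ++ _ = _
  rw [List.map_append]
  congr 1
  · apply List.map_congr_left
    intro k hk
    have : k ≠ x := fun h => hx (h ▸ hk)
    simp [this]
  · simp

theorem items_eq_keys_map {β : Type} (d : PySem.Dict String (List β)) (hn : d.keys.Nodup) :
    d.items = d.keys.map (fun k => (k, d.getD k [])) := by
  show d.items = (d.items.map (fun x => x.1)).map (fun k => (k, d.getD k []))
  rw [List.map_map]
  conv_lhs => rw [← List.map_id d.items]
  apply List.map_congr_left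
  intro p hp
  have hg : d.get? p.1 = some p.2 :=
    PySem.Dict.get?_of_mem_items d (by simpa using hp) hn
  show p = (p.1, d.getD p.1 [])
  rw [PySem.Dict.getD, hg]
  rfl

theorem keys_modify_mem {β : Type} (σ : PySem.Dict String (List β)) {c : String}
    (hc : c ∈ σ.keys) (f : List β → List β) : (σ.modify c [] f).keys = σ.keys := by
  show (σ.insert c _).keys = σ.keys
  exact PySem.Dict.keys_insert_of_contains σ _ ((PySem.Dict.contains_iff_mem_keys σ c).2 hc)

theorem items_modify_set (σ : PySem.Dict String (List (String × Int)))
    (hn : σ.keys.Nodup) (e : (String × Int) × (String × Int)) (hc : e.1.1 ∈ σ.keys) :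
    (σ.modify e.1.1 [] (fun rowL => rowL.set e.1.2.toNat e.2)).items = updRow σ.items e := by
  show (σ.insert e.1.1 _).items = _
  rw [PySem.Dict.items_insert_of_contains σ _ ((PySem.Dict.contains_iff_mem_keys σ _).2 hc)]
  apply List.map_congr_left
  intro p hp
  by_cases h : p.1 = e.1.1
  · have hg : σ.get? p.1 = some p.2 :=
      PySem.Dict.get?_of_mem_items σ (by simpa using hp) hn
    rw [if_pos (show (p.1 == e.1.1) = true by simp [h])]
    have hv : σ.getD e.1.1 [] = p.2 := by
      rw [← h, PySem.Dict.getD, hg]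
      rfl
    rw [hv, h]
    simp
  · simp [h]

theorem foldl_modify_items (es : List ((String × Int) × (String × Int)))
    (σ : PySem.Dict String (List (String × Int))) (hn : σ.keys.Nodup)
    (hsub : ∀ e ∈ es, e.1.1 ∈ σ.keys) :
    (es.foldl (fun σ e => σ.modify e.1.1 [] (fun rowL => rowL.set e.1.2.toNat e.2)) σ).items
        = applyE σ.items es
      ∧ (es.foldl (fun σ e => σ.modify e.1.1 [] (fun rowL => rowL.set e.1.2.toNat e.2)) σ).keys
        = σ.keys := by
  induction es generalizing σ with
  | nil => exact ⟨rfl, rfl⟩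
  | cons e t ih =>
    have hc : e.1.1 ∈ σ.keys := hsub e (by simp)
    have hk := keys_modify_mem σ hc (fun rowL => rowL.set e.1.2.toNat e.2)
    obtain ⟨h1, h2⟩ := ih (σ.modify e.1.1 [] (fun rowL => rowL.set e.1.2.toNat e.2))
      (hk ▸ hn) (fun e' he' => hk ▸ hsub e' (List.mem_cons_of_mem _ he'))
    refine ⟨?_, by rw [List.foldl_cons, h2, hk]⟩
    rw [List.foldl_cons, h1, items_modify_set σ hn e hc]
    rfl

-- ---- updRow / applyE ----

theorem updRow_comm (L : List (String × List (String × Int)))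
    (e1 e2 : (String × Int) × (String × Int)) (h : pvKey e1.1 ≠ pvKey e2.1) :
    updRow (updRow L e1) e2 = updRow (updRow L e2) e1 := by
  unfold updRow
  rw [List.map_map, List.map_map]
  apply List.map_congr_left
  intro p _
  obtain ⟨ps, pr⟩ := p
  show (fun p => if p.1 == e2.1.1 then (p.1, p.2.set e2.1.2.toNat e2.2) else p)
        (if (ps == e1.1.1) = true then (ps, pr.set e1.1.2.toNat e1.2) else (ps, pr))
      = (fun p => if p.1 == e1.1.1 then (p.1, p.2.set e1.1.2.toNat e1.2) else p)
        (if (ps == e2.1.1) = true then (ps, pr.set e2.1.2.toNat e2.2) else (ps, pr))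
  simp only [beq_iff_eq]
  by_cases h1 : ps = e1.1.1 <;> by_cases h2 : ps = e2.1.1
  · have hr : e1.1.2.toNat ≠ e2.1.2.toNat := by
      intro hr
      exact h (by unfold pvKey; rw [← h1, ← h2, hr])
    simp only [if_pos h1, if_pos h2]
    exact congrArg (Prod.mk ps) (List.set_comm _ _ hr)
  · simp only [if_pos h1, if_neg h2]
  · simp only [if_neg h1, if_pos h2]
  · simp only [if_neg h1, if_neg h2]

theorem applyE_perm (L : List (String × List (String × Int)))
    {es1 es2 : List ((String × Int) × (String × Int))} (hp : es1.Perm es2)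
    (hn : (es1.map (fun e => pvKey e.1)).Nodup) : applyE L es1 = applyE L es2 := by
  unfold applyE
  refine hp.foldl_eq' ?_ L
  intro x hx y hy z
  rcases eq_or_ne x y with rfl | hne
  · rfl
  · have hk : pvKey x.1 ≠ pvKey y.1 := by
      intro he
      exact hne (List.inj_on_of_nodup_map hn hx hy he)
    exact (updRow_comm z y x (Ne.symm hk)).symm

-- ---- flat / occurrences combinatorics ----

theorem mem_occof {H : List ((String × Int) × String)} {l : String} {p : String × Int} :
    p ∈ occof H l ↔ (p, l) ∈ H := by
  unfold occof
  simp only [List.mem_map, List.mem_filter, beq_iff_eq]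
  constructor
  · rintro ⟨⟨q, m⟩, ⟨hmem, hm⟩, hq⟩
    cases hm; cases hq; exact hmem
  · intro hmem
    exact ⟨(p, l), ⟨hmem, rfl⟩, rfl⟩

theorem mem_labsOf {H : List ((String × Int) × String)} {l : String} :
    l ∈ labsOf H ↔ l ∈ H.map Prod.snd :=
  PySem.Set.mem_ofList _ _

theorem occof_ne_nil {H : List ((String × Int) × String)} {l : String} (h : l ∈ labsOf H) :
    occof H l ≠ [] := by
  rw [mem_labsOf] at h
  obtain ⟨pl, hmem, hl⟩ := List.mem_map.1 h
  intro hnil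
  have hp : pl.1 ∈ occof H l := mem_occof.2 (by rw [← hl]; simpa using hmem)
  rw [hnil] at hp
  exact List.not_mem_nil hp

theorem occof_eq_nil {H : List ((String × Int) × String)} {l : String} (h : l ∉ labsOf H) :
    occof H l = [] := by
  by_contra hne
  obtain ⟨p, hp⟩ := List.exists_mem_of_ne_nil _ hne
  exact h (mem_labsOf.2 (List.mem_map.2 ⟨(p, l), mem_occof.1 hp, rfl⟩))

theorem occof_append (H : List ((String × Int) × String)) (x : (String × Int) × String)
    (l : String) :
    occof (H ++ [x]) l = occof H l ++ (if x.2 = l then [x.1] else []) := by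
  unfold occof
  rw [List.filter_append, List.map_append]
  congr 1
  by_cases h : x.2 = l <;> simp [h]

theorem labsOf_append_mem {H : List ((String × Int) × String)} {x : (String × Int) × String}
    (h : x.2 ∈ labsOf H) : labsOf (H ++ [x]) = labsOf H := by
  unfold labsOf at h ⊢
  rw [List.map_append, List.map_singleton]
  rw [show PySem.Set.ofList (H.map Prod.snd ++ [x.2])
      = PySem.Set.add (PySem.Set.ofList (H.map Prod.snd)) x.2 by
    simp [PySem.Set.ofList, List.foldl_append]]
  unfold PySem.Set.add
  rw [if_pos (show PySem.Set.contains _ x.2 = true by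
    unfold PySem.Set.contains; exact List.contains_iff_mem.2 h)]

theorem labsOf_append_not_mem {H : List ((String × Int) × String)} {x : (String × Int) × String}
    (h : x.2 ∉ labsOf H) : labsOf (H ++ [x]) = labsOf H ++ [x.2] := by
  unfold labsOf at h ⊢
  rw [List.map_append, List.map_singleton]
  rw [show PySem.Set.ofList (H.map Prod.snd ++ [x.2])
      = PySem.Set.add (PySem.Set.ofList (H.map Prod.snd)) x.2 by
    simp [PySem.Set.ofList, List.foldl_append]]
  unfold PySem.Set.add
  rw [if_neg (show ¬ PySem.Set.contains _ x.2 = true by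
    unfold PySem.Set.contains; rw [List.contains_iff_mem]; exact h)]

theorem nodup_labsOf (H : List ((String × Int) × String)) : (labsOf H).Nodup :=
  PySem.Set.nodup_ofList _

theorem posInj {H : List ((String × Int) × String)}
    (hH : (H.map (fun pl => pvKey pl.1)).Nodup) {l1 l2 : String} {p1 p2 : String × Int}
    (h1 : p1 ∈ occof H l1) (h2 : p2 ∈ occof H l2) (hk : pvKey p1 = pvKey p2) :
    l1 = l2 ∧ p1 = p2 := by
  have hm1 := mem_occof.1 h1
  have hm2 := mem_occof.1 h2
  have heq := List.inj_on_of_nodup_map hH hm1 hm2 hk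
  exact ⟨congrArg Prod.snd heq, congrArg Prod.fst heq⟩

theorem nodup_pvKey_occof {H : List ((String × Int) × String)}
    (hH : (H.map (fun pl => pvKey pl.1)).Nodup) (l : String) :
    ((occof H l).map pvKey).Nodup := by
  unfold occof
  rw [List.map_map]
  exact ((List.filter_sublist).map _).nodup hH

theorem zip_tail_append (c : List (String × Int)) (p : String × Int) (hc : c ≠ []) :
    (c ++ [p]).zip (c ++ [p]).tail = c.zip c.tail ++ [(c.getLastD ("", 0), p)] := by
  induction c with
  | nil => exact absurd rfl hc
  | cons a t ih =>
    cases t with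
    | nil => rfl
    | cons b t' =>
      have hih := ih (by simp)
      simp only [List.cons_append, List.tail_cons, List.zip_cons_cons] at hih ⊢
      rw [hih]
      simp [List.getLastD]

-- ---- growth of groupedL and the bookkeeping dicts ----

theorem grouped_append_not_mem {H : List ((String × Int) × String)}
    {x : (String × Int) × String} (h : x.2 ∉ labsOf H) :
    groupedL (H ++ [x]) = groupedL H := by
  unfold groupedL
  rw [labsOf_append_not_mem h, List.flatMap_append]
  have h2 : occof (H ++ [x]) x.2 = [x.1] := by
    rw [occof_append, occof_eq_nil h]; simp
  rw [show ([x.2] : List String).flatMap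
      (fun l => (occof (H ++ [x]) l).zip (occof (H ++ [x]) l).tail) = [] by simp [h2]]
  rw [List.append_nil]
  apply flatMap_congr_mem
  intro l hl
  have hne : x.2 ≠ l := fun he => h (he ▸ hl)
  rw [occof_append, if_neg hne, List.append_nil]

theorem grouped_append_mem {H : List ((String × Int) × String)}
    {x : (String × Int) × String} (h : x.2 ∈ labsOf H) :
    (groupedL H ++ [((occof H x.2).getLastD ("", 0), x.1)]).Perm (groupedL (H ++ [x])) := by
  unfold groupedL
  rw [labsOf_append_mem h]
  obtain ⟨u, v, huv⟩ := List.append_of_mem h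
  have hnd : (labsOf H).Nodup := nodup_labsOf H
  rw [huv] at hnd
  have hdisj := List.disjoint_of_nodup_append hnd
  have hxu : x.2 ∉ u := fun hmem => (List.disjoint_left.1 hdisj) hmem (by simp)
  have hxv : x.2 ∉ v := (List.nodup_cons.1 (List.Nodup.of_append_right hnd)).1
  have hocc : ∀ l, l ≠ x.2 → occof (H ++ [x]) l = occof H l := by
    intro l hl
    rw [occof_append, if_neg (Ne.symm hl), List.append_nil]
  have hocc2 : occof (H ++ [x]) x.2 = occof H x.2 ++ [x.1] := by
    rw [occof_append, if_pos rfl]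
  rw [huv, List.flatMap_append, List.flatMap_append, List.flatMap_cons, List.flatMap_cons]
  have hu : u.flatMap (fun l => (occof (H ++ [x]) l).zip (occof (H ++ [x]) l).tail)
      = u.flatMap (fun l => (occof H l).zip (occof H l).tail) :=
    flatMap_congr_mem (fun l hl => by rw [hocc l (fun he => hxu (he ▸ hl))])
  have hv : v.flatMap (fun l => (occof (H ++ [x]) l).zip (occof (H ++ [x]) l).tail)
      = v.flatMap (fun l => (occof H l).zip (occof H l).tail) :=
    flatMap_congr_mem (fun l hl => by rw [hocc l (fun he => hxv (he ▸ hl))])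
  rw [hu, hv, hocc2, zip_tail_append _ _ (occof_ne_nil h)]
  exact append_rot_perm _ _ _ _

theorem get?_pvPrevD (H : List ((String × Int) × String)) (l : String) :
    (pvPrevD H).get? l
      = if l ∈ labsOf H then some ((occof H l).getLastD ("", 0)) else none :=
  get?_mk_map _ _ _

theorem getD_pvFirstD {H : List ((String × Int) × String)} {l : String} (h : l ∈ labsOf H) :
    (pvFirstD H).getD l ("", 0) = (occof H l).headD ("", 0) := by
  unfold pvFirstD PySem.Dict.getD
  rw [get?_mk_map, if_pos h]
  rfl

theorem pvPrevD_append (H : List ((String × Int) × String)) (x : (String × Int) × String) :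
    (pvPrevD H).insert x.2 x.1 = pvPrevD (H ++ [x]) := by
  unfold pvPrevD
  by_cases h : x.2 ∈ labsOf H
  · rw [insert_mk_map_mem _ _ _ h, labsOf_append_mem h]
    congr 1
    apply List.map_congr_left
    intro l hl
    by_cases he : l = x.2
    · subst he
      rw [if_pos rfl, occof_append, if_pos rfl, List.getLastD_concat]
    · rw [if_neg he, occof_append, if_neg (fun hx => he hx.symm), List.append_nil]
  · rw [insert_mk_map_not_mem _ _ _ h, labsOf_append_not_mem h]
    congr 1
    apply List.map_congr_left
    intro l hl
    by_cases he : l = x.2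
    · subst he
      rw [if_pos rfl, occof_append, if_pos rfl, occof_eq_nil h]
      simp
    · rw [if_neg he, occof_append, if_neg (fun hx => he hx.symm), List.append_nil]

theorem pvFirstD_append_mem {H : List ((String × Int) × String)} {x : (String × Int) × String}
    (h : x.2 ∈ labsOf H) : pvFirstD (H ++ [x]) = pvFirstD H := by
  unfold pvFirstD
  rw [labsOf_append_mem h]
  congr 1
  apply List.map_congr_left
  intro l hl
  by_cases he : l = x.2
  · subst he
    rw [occof_append, if_pos rfl, headD_append_left (occof_ne_nil h)]
  · rw [occof_append, if_neg (fun hx => he hx.symm), List.append_nil]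

theorem pvFirstD_append_not_mem {H : List ((String × Int) × String)} {x : (String × Int) × String}
    (h : x.2 ∉ labsOf H) : pvFirstD (H ++ [x]) = (pvFirstD H).insert x.2 x.1 := by
  unfold pvFirstD
  rw [insert_mk_map_not_mem _ _ _ h, labsOf_append_not_mem h]
  congr 1
  apply List.map_congr_left
  intro l hl
  by_cases he : l = x.2
  · subst he
    rw [if_pos rfl, occof_append, if_pos rfl, occof_eq_nil h]
    simp
  · rw [if_neg he, occof_append, if_neg (fun hx => he hx.symm), List.append_nil]

-- ---- cyclePairs ----

theorem cyclePairs_fst (c : List (String × Int)) : (cyclePairs c).map Prod.fst = c := by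
  unfold cyclePairs
  rw [List.map_map]
  exact PySem.List.map_snd_enumerate c 0

theorem cyclePairs_eq (c : List (String × Int)) (hc : c ≠ []) :
    cyclePairs c = c.zip c.tail ++ [(c.getLastD ("", 0), c.headD ("", 0))] := by
  have hn : 0 < c.length := List.length_pos_iff.2 hc
  have hhead : c.headD ("", 0) = c.head hc := by
    cases c with
    | nil => exact absurd rfl hc
    | cons a t => rfl
  apply List.ext_getElem
  · simp only [cyclePairs, List.length_map, PySem.List.length_enumerate, List.length_append,
      List.length_zip, List.length_tail, List.length_cons, List.length_nil]
    omega
  intro i h1 h2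
  have hi : i < c.length := by
    simpa [cyclePairs, PySem.List.length_enumerate] using h1
  unfold cyclePairs
  rw [List.getElem_map, PySem.List.getElem_enumerate c 0 i
    (by simpa [PySem.List.length_enumerate] using hi)]
  have hmod : PySem.Int.mod ((0 : Int) + (i : Int) + 1) (c.length : Int)
      = (((i + 1) % c.length : Nat) : Int) := by
    rw [PySem.Int.mod_eq_emod_of_pos (by exact_mod_cast hn)]
    push_cast
    norm_num
  rw [hmod, PySem.List.pyGetD_natCast, List.getD_eq_getElem _ _ (Nat.mod_lt _ hn)]
  by_cases hil : i + 1 < c.length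
  · rw [List.getElem_append_left (by
      simp only [List.length_zip, List.length_tail]; omega)]
    rw [List.getElem_zip, List.getElem_tail]
    simp [Nat.mod_eq_of_lt hil]
  · have hieq : i = c.length - 1 := by omega
    subst hieq
    have hmod0 : (c.length - 1 + 1) % c.length = 0 := by
      rw [show c.length - 1 + 1 = c.length by omega]
      exact Nat.mod_self _
    rw [List.getElem_append_right (by
      simp only [List.length_zip, List.length_tail]; omega)]
    simp only [List.length_zip, List.length_tail, hmod0]
    rw [List.getElem_singleton]
    have h1 : c.getLastD ("", 0) = c.getLast hc := by
      rw [List.getLastD_eq_getLast?, List.getLast?_eq_some_getLast hc]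
      rfl
    rw [h1, List.getLast_eq_getElem hc, hhead, List.head_eq_getElem hc]

-- ---- the two sides ----

theorem nodup_flatL_pvKey (wl : PySem.Dict String (List String)) :
    ((flatL wl).map (fun pl => pvKey pl.1)).Nodup := by
  unfold flatL
  rw [List.map_flatMap, List.nodup_flatMap]
  constructor
  · intro col _
    rw [List.map_map]
    have heq : (PySem.List.enumerate (wl.getD col [])).map
          ((fun pl => pvKey pl.1) ∘ fun rl => ((col, rl.1), rl.2))
        = (List.range (wl.getD col []).length).map (fun j => (col, j)) := by
      apply List.ext_getElem
      · simp [PySem.List.length_enumerate]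
      intro k hk1 hk2
      rw [List.getElem_map, List.getElem_map,
        PySem.List.getElem_enumerate _ 0 k (by simpa using hk1), List.getElem_range]
      simp [Function.comp, pvKey]
    rw [heq]
    exact List.nodup_range.map (fun a b hab => congrArg Prod.snd hab)
  · have hnd : pyCOLUMNS.Nodup := by decide
    refine hnd.imp ?_
    intro c1 c2 hne
    intro a ha1 ha2
    obtain ⟨rl1, hrl1m, hrl1⟩ := List.mem_map.1 ha1
    obtain ⟨s1, _, hs1⟩ := List.mem_map.1 hrl1m
    obtain ⟨rl2, hrl2m, hrl2⟩ := List.mem_map.1 ha2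
    obtain ⟨s2, _, hs2⟩ := List.mem_map.1 hrl2m
    apply hne
    have e1 : a.1 = c1 := by rw [← hrl1, ← hs1]; rfl
    have e2 : a.1 = c2 := by rw [← hrl2, ← hs2]; rfl
    rw [← e1, ← e2]

theorem flatL_cols (wl : PySem.Dict String (List String)) :
    ∀ pl ∈ flatL wl, pl.1.1 ∈ pyCOLUMNS := by
  intro pl hpl
  obtain ⟨col, hcol, hmem⟩ := List.mem_flatMap.1 hpl
  obtain ⟨rl, _, hrl⟩ := List.mem_map.1 hmem
  rw [← hrl]
  exact hcol

theorem occurrences_items (wl : PySem.Dict String (List String)) :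
    (pyCOLUMNS.foldl (fun occ col =>
      (PySem.List.enumerate (wl.getD col [])).foldl (fun occ rl =>
        occ.modify rl.2 [] (fun c => c ++ [(col, rl.1)])) occ) PySem.Dict.empty).items
    = (labsOf (flatL wl)).map (fun l => (l, occof (flatL wl) l)) := by
  have hfold : pyCOLUMNS.foldl (fun occ col =>
        (PySem.List.enumerate (wl.getD col [])).foldl (fun occ rl =>
          occ.modify rl.2 [] (fun c => c ++ [(col, rl.1)])) occ) PySem.Dict.empty
      = (flatL wl).foldl (fun occ pl => occ.modify pl.2 [] (fun c => c ++ [pl.1]))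
          PySem.Dict.empty := by
    unfold flatL
    rw [List.foldl_flatMap]
    simp only [List.foldl_map]
  rw [hfold]
  have hkeys : ((flatL wl).foldl (fun occ pl => occ.modify pl.2 [] (fun c => c ++ [pl.1]))
        PySem.Dict.empty).keys = labsOf (flatL wl) := by
    rw [PySem.Dict.keys_foldl_modify_key (flatL wl) Prod.snd []
      (fun _ x => fun c => c ++ [x.1]) PySem.Dict.empty]
    rfl
  have hnd : ((flatL wl).foldl (fun occ pl => occ.modify pl.2 [] (fun c => c ++ [pl.1]))
        PySem.Dict.empty).keys.Nodup := by
    rw [hkeys]; exact nodup_labsOf _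
  have hget : ∀ l, ((flatL wl).foldl (fun occ pl => occ.modify pl.2 []
        (fun c => c ++ [pl.1])) PySem.Dict.empty).getD l [] = occof (flatL wl) l := by
    intro l
    rw [show (flatL wl).foldl (fun occ pl => occ.modify pl.2 [] (fun c => c ++ [pl.1]))
          PySem.Dict.empty
        = ((flatL wl).map (fun pl => (pl.2, pl.1))).foldl
            (fun d p => d.modify p.1 [] (fun xs => xs ++ [p.2])) PySem.Dict.empty by
      rw [List.foldl_map]]
    rw [PySem.Dict.getD_foldl_modify_append, List.filter_map, List.map_map]
    unfold occof
    congr 1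
  rw [items_eq_keys_map _ hnd, hkeys]
  exact List.map_congr_left (fun l _ => by rw [hget l])

theorem LA_nodup (wl : PySem.Dict String (List String)) :
    (((labsOf (flatL wl)).flatMap (fun l => cyclePairs (occof (flatL wl) l))).map
      (fun e => pvKey e.1)).Nodup := by
  have hflat := nodup_flatL_pvKey wl
  have heq : ∀ l, (cyclePairs (occof (flatL wl) l)).map (fun e => pvKey e.1)
      = (occof (flatL wl) l).map pvKey := by
    intro l
    rw [show (fun (e : (String × Int) × (String × Int)) => pvKey e.1)
        = (pvKey ∘ Prod.fst) from rfl]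
    rw [← List.map_map, cyclePairs_fst]
  rw [List.map_flatMap, List.nodup_flatMap]
  constructor
  · intro l _
    rw [heq l]
    exact nodup_pvKey_occof hflat l
  · refine (nodup_labsOf _).imp ?_
    intro l1 l2 hne a ha1 ha2
    have ha1' : a ∈ (cyclePairs (occof (flatL wl) l1)).map (fun e => pvKey e.1) := ha1
    have ha2' : a ∈ (cyclePairs (occof (flatL wl) l2)).map (fun e => pvKey e.1) := ha2
    rw [heq l1] at ha1'
    rw [heq l2] at ha2'
    obtain ⟨p1, hp1, hk1⟩ := List.mem_map.1 ha1'
    obtain ⟨p2, hp2, hk2⟩ := List.mem_map.1 ha2'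
    exact hne (posInj hflat hp1 hp2 (by rw [hk1, hk2])).1

theorem LA_perm (wl : PySem.Dict String (List String)) :
    ((labsOf (flatL wl)).flatMap (fun l => cyclePairs (occof (flatL wl) l))).Perm
      (groupedL (flatL wl) ++ wrapL (flatL wl)) := by
  rw [flatMap_congr_mem (fun l hl => cyclePairs_eq _ (occof_ne_nil hl))]
  exact flatMap_sing_perm _ _ _

theorem grouped_esOf (H : List ((String × Int) × String)) :
    ∀ h, (groupedL h ++ esOf h H).Perm (groupedL (h ++ H)) := by
  induction H with
  | nil => intro h; simp [esOf]
  | cons x t ih =>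
    intro h
    rw [show esOf h (x :: t)
        = (if x.2 ∈ labsOf h then [((occof h x.2).getLastD ("", 0), x.1)] else [])
            ++ esOf (h ++ [x]) t from rfl]
    by_cases hx : x.2 ∈ labsOf h
    · rw [if_pos hx, show h ++ x :: t = (h ++ [x]) ++ t by simp]
      refine List.Perm.trans ?_ (ih (h ++ [x]))
      rw [← List.append_assoc]
      exact (grouped_append_mem hx).append_right _
    · rw [if_neg hx, List.nil_append, show h ++ x :: t = (h ++ [x]) ++ t by simp,
        ← grouped_append_not_mem hx]
      exact ih (h ++ [x])

theorem B_inv (pre : List ((String × Int) × String)) :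
    ∀ (h : List ((String × Int) × String)) (σ : PySem.Dict String (List (String × Int)))
      (f0 p0 : PySem.Dict String (String × Int))
      (es0 : List ((String × Int) × (String × Int)))
      (L0 : List (String × List (String × Int))) (K0 : List String),
      f0 = pvFirstD h → p0 = pvPrevD h →
      σ.items = applyE L0 es0 → σ.keys = K0 → K0.Nodup →
      (∀ pl ∈ h ++ pre, pl.1.1 ∈ K0) →
      (pre.foldl stepB (σ, f0, p0)).1.items = applyE L0 (es0 ++ esOf h pre)
      ∧ (pre.foldl stepB (σ, f0, p0)).1.keys = K0
      ∧ (pre.foldl stepB (σ, f0, p0)).2.1 = pvFirstD (h ++ pre)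
      ∧ (pre.foldl stepB (σ, f0, p0)).2.2 = pvPrevD (h ++ pre) := by
  induction pre with
  | nil =>
    intro h σ f0 p0 es0 L0 K0 hf hp hi hk hnd hcols
    subst hf hp
    refine ⟨?_, hk, by simp, by simp⟩
    rw [show esOf h [] = [] from rfl, List.append_nil]
    exact hi
  | cons x t ih =>
    intro h σ f0 p0 es0 L0 K0 hf hp hi hk hnd hcols
    subst hf hp
    rw [List.foldl_cons]
    by_cases hx : x.2 ∈ labsOf h
    · set q := (occof h x.2).getLastD ("", 0) with hq
      have hstep : stepB (σ, pvFirstD h, pvPrevD h) x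
          = (σ.modify q.1 [] (fun rowL => rowL.set q.2.toNat x.1),
             pvFirstD (h ++ [x]), pvPrevD (h ++ [x])) := by
        unfold stepB
        rw [show (σ, pvFirstD h, pvPrevD h).2.2.get? x.2 = some q by
          rw [show (σ, pvFirstD h, pvPrevD h).2.2 = pvPrevD h from rfl, get?_pvPrevD,
            if_pos hx]]
        rw [show (σ, pvFirstD h, pvPrevD h).2.2.insert x.2 x.1 = pvPrevD (h ++ [x]) from
          pvPrevD_append h x]
        rw [show (σ, pvFirstD h, pvPrevD h).2.1 = pvFirstD h from rfl,
          ← pvFirstD_append_mem hx]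
      rw [hstep]
      have hqcol : q.1 ∈ K0 := by
        have hqm : (q, x.2) ∈ h := mem_occof.1 (getLastD_mem (occof_ne_nil hx) _)
        exact hcols (q, x.2) (by simp [hqm])
      have hkeys2 := keys_modify_mem σ (c := q.1) (hk ▸ hqcol)
        (fun rowL => rowL.set q.2.toNat x.1)
      have hitems2 : (σ.modify q.1 [] (fun rowL => rowL.set q.2.toNat x.1)).items
          = applyE L0 (es0 ++ [(q, x.1)]) := by
        have hms := items_modify_set σ (hk ▸ hnd) (q, x.1) (hk ▸ hqcol)
        rw [hms, hi]
        unfold applyE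
        rw [List.foldl_append]
        rfl
      obtain ⟨h1, h2, h3, h4⟩ := ih (h ++ [x])
        (σ.modify q.1 [] (fun rowL => rowL.set q.2.toNat x.1))
        (pvFirstD (h ++ [x])) (pvPrevD (h ++ [x])) (es0 ++ [(q, x.1)]) L0 K0
        rfl rfl hitems2 (by rw [hkeys2, hk]) hnd
        (by intro pl hpl; exact hcols pl (by
          rw [show (h ++ [x]) ++ t = h ++ x :: t by simp] at hpl; exact hpl))
      refine ⟨?_, h2, ?_, ?_⟩
      · rw [h1]
        rw [show esOf h (x :: t)
          = (if x.2 ∈ labsOf h then [((occof h x.2).getLastD ("", 0), x.1)] else [])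
              ++ esOf (h ++ [x]) t from rfl, if_pos hx]
        rw [← hq, ← List.append_assoc]
      · rw [h3]; simp
      · rw [h4]; simp
    · have hstep : stepB (σ, pvFirstD h, pvPrevD h) x
          = (σ, pvFirstD (h ++ [x]), pvPrevD (h ++ [x])) := by
        unfold stepB
        rw [show (σ, pvFirstD h, pvPrevD h).2.2.get? x.2 = none by
          rw [show (σ, pvFirstD h, pvPrevD h).2.2 = pvPrevD h from rfl, get?_pvPrevD,
            if_neg hx]]
        rw [show (σ, pvFirstD h, pvPrevD h).2.2.insert x.2 x.1 = pvPrevD (h ++ [x]) from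
          pvPrevD_append h x]
        rw [show (σ, pvFirstD h, pvPrevD h).2.1.insert x.2 x.1 = pvFirstD (h ++ [x]) from
          (pvFirstD_append_not_mem hx).symm]
      rw [hstep]
      obtain ⟨h1, h2, h3, h4⟩ := ih (h ++ [x]) σ (pvFirstD (h ++ [x])) (pvPrevD (h ++ [x]))
        es0 L0 K0 rfl rfl hi hk hnd
        (by intro pl hpl; exact hcols pl (by
          rw [show (h ++ [x]) ++ t = h ++ x :: t by simp] at hpl; exact hpl))
      refine ⟨?_, h2, ?_, ?_⟩
      · rw [h1]
        rw [show esOf h (x :: t)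
          = (if x.2 ∈ labsOf h then [((occof h x.2).getLastD ("", 0), x.1)] else [])
              ++ esOf (h ++ [x]) t from rfl, if_neg hx, List.nil_append]
      · rw [h3]; simp
      · rw [h4]; simp

theorem stepA_eq (σ : PySem.Dict String (List (String × Int))) (c : List (String × Int)) :
    (if c.length == 1 then
        σ.modify (PySem.List.pyGetD c 0 ("", 0)).1 []
          (fun rowL => rowL.set (PySem.List.pyGetD c 0 ("", 0)).2.toNat
            (PySem.List.pyGetD c 0 ("", 0)))
      else (PySem.List.enumerate c).foldl (fun σ ip => σ.modify ip.2.1 [] (fun rowL =>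
          rowL.set ip.2.2.toNat
            (PySem.List.pyGetD c (PySem.Int.mod (ip.1 + 1) (c.length : Int)) ("", 0)))) σ)
    = (cyclePairs c).foldl
        (fun σ e => σ.modify e.1.1 [] (fun rowL => rowL.set e.1.2.toNat e.2)) σ := by
  rw [show (cyclePairs c).foldl
        (fun σ e => σ.modify e.1.1 [] (fun rowL => rowL.set e.1.2.toNat e.2)) σ
      = (PySem.List.enumerate c).foldl (fun σ ip => σ.modify ip.2.1 [] (fun rowL =>
          rowL.set ip.2.2.toNat
            (PySem.List.pyGetD c (PySem.Int.mod (ip.1 + 1) (c.length : Int)) ("", 0)))) σ from by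
    unfold cyclePairs
    rw [List.foldl_map]]
  by_cases hlen : c.length = 1
  · obtain ⟨p, rfl⟩ := List.length_eq_one_iff.1 hlen
    rw [if_pos (by simp)]
    rw [show PySem.List.enumerate [p] = [((0 : Int), p)] from rfl]
    simp only [List.foldl_cons, List.foldl_nil]
    rw [show List.length [p] = 1 from rfl]
    rw [show PySem.Int.mod (0 + 1) ((1 : Nat) : Int) = 0 from by decide]
    rfl
  · rw [if_neg (by simpa using hlen)]

theorem sideA (wire_labels : List (String × List String))
    (hpre : Pre_build_sigma_map wire_labels) :
    build_sigma_map wire_labels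
      = applyE (wire_labels.map (fun p => (p.1, List.replicate p.2.length (("", 0) : String × Int))))
          ((labsOf (flatL (PySem.Dict.mk wire_labels))).flatMap
            (fun l => cyclePairs (occof (flatL (PySem.Dict.mk wire_labels)) l))) := by
  obtain ⟨hnd, hcols⟩ := hpre
  have hk0 : (PySem.Dict.mk (wire_labels.map (fun p =>
      (p.1, List.replicate p.2.length (("", 0) : String × Int))))).keys = wire_labels.map Prod.fst := by
    show (wire_labels.map _).map _ = _
    rw [List.map_map]
    exact List.map_congr_left (fun p _ => rfl)
  have hndk : (PySem.Dict.mk (wire_labels.map (fun p =>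
      (p.1, List.replicate p.2.length (("", 0) : String × Int))))).keys.Nodup := by rw [hk0]; exact hnd
  have hsub : ∀ e ∈ (labsOf (flatL (PySem.Dict.mk wire_labels))).flatMap
        (fun l => cyclePairs (occof (flatL (PySem.Dict.mk wire_labels)) l)),
      e.1.1 ∈ (PySem.Dict.mk (wire_labels.map (fun p =>
        (p.1, List.replicate p.2.length (("", 0) : String × Int))))).keys := by
    intro e he
    obtain ⟨l, hl, hec⟩ := List.mem_flatMap.1 he
    have he1 : e.1 ∈ occof (flatL (PySem.Dict.mk wire_labels)) l := by
      rw [← cyclePairs_fst (occof (flatL (PySem.Dict.mk wire_labels)) l)]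
      exact List.mem_map_of_mem hec
    have hf : (e.1, l) ∈ flatL (PySem.Dict.mk wire_labels) := mem_occof.1 he1
    have hcp : e.1.1 ∈ pyCOLUMNS := flatL_cols _ _ hf
    rw [hk0]
    exact hcols _ hcp
  simp only [build_sigma_map]
  rw [show (PySem.Dict.values (pyCOLUMNS.foldl (fun occ col =>
      (PySem.List.enumerate ((PySem.Dict.mk wire_labels).getD col [])).foldl (fun occ rl =>
        occ.modify rl.2 [] (fun c => c ++ [(col, rl.1)])) occ) PySem.Dict.empty))
      = (labsOf (flatL (PySem.Dict.mk wire_labels))).map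
          (fun l => occof (flatL (PySem.Dict.mk wire_labels)) l) by
    show ((pyCOLUMNS.foldl (fun occ col =>
      (PySem.List.enumerate ((PySem.Dict.mk wire_labels).getD col [])).foldl (fun occ rl =>
        occ.modify rl.2 [] (fun c => c ++ [(col, rl.1)])) occ) PySem.Dict.empty).items).map
        (fun x => x.2) = _
    rw [occurrences_items, List.map_map]
    rfl]
  rw [List.foldl_map]
  show (List.foldl (fun acc l =>
      if (occof (flatL (PySem.Dict.mk wire_labels)) l).length == 1 then
        acc.modify (PySem.List.pyGetD (occof (flatL (PySem.Dict.mk wire_labels)) l) 0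
            ("", 0)).1 []
          (fun rowL => rowL.set (PySem.List.pyGetD
              (occof (flatL (PySem.Dict.mk wire_labels)) l) 0 ("", 0)).2.toNat
            (PySem.List.pyGetD (occof (flatL (PySem.Dict.mk wire_labels)) l) 0 ("", 0)))
      else (PySem.List.enumerate (occof (flatL (PySem.Dict.mk wire_labels)) l)).foldl
          (fun σ ip => σ.modify ip.2.1 [] (fun rowL =>
            rowL.set ip.2.2.toNat
              (PySem.List.pyGetD (occof (flatL (PySem.Dict.mk wire_labels)) l)
                (PySem.Int.mod (ip.1 + 1)
                  ((occof (flatL (PySem.Dict.mk wire_labels)) l).length : Int)) ("", 0)))) acc)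
      (PySem.Dict.mk (wire_labels.map (fun p => (p.1, List.replicate p.2.length (("", 0) : String × Int)))))
      (labsOf (flatL (PySem.Dict.mk wire_labels)))).items = _
  rw [PySem.List.foldl_congr_mem _ _
    (fun acc l => (cyclePairs (occof (flatL (PySem.Dict.mk wire_labels)) l)).foldl
      (fun σ e => σ.modify e.1.1 [] (fun rowL => rowL.set e.1.2.toNat e.2)) acc) _
    (fun acc l _ => stepA_eq acc (occof (flatL (PySem.Dict.mk wire_labels)) l))]
  rw [← List.foldl_flatMap]
  exact (foldl_modify_items _ _ hndk hsub).1

theorem sideB (wire_labels : List (String × List String))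
    (hpre : Pre_build_sigma_map wire_labels) :
    build_sigma_map_alt wire_labels
      = applyE (wire_labels.map (fun p => (p.1, List.replicate p.2.length ("", 0))))
          (groupedL (flatL (PySem.Dict.mk wire_labels))
            ++ wrapL (flatL (PySem.Dict.mk wire_labels))) := by
  obtain ⟨hnd, hcols⟩ := hpre
  have hk0 : (PySem.Dict.mk (wire_labels.map (fun p =>
      (p.1, List.replicate p.2.length (("", 0) : String × Int))))).keys
      = wire_labels.map Prod.fst := by
    show (wire_labels.map _).map _ = _
    rw [List.map_map]
    exact List.map_congr_left (fun p _ => rfl)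
  have hcolsF : ∀ pl ∈ ([] : List ((String × Int) × String))
        ++ flatL (PySem.Dict.mk wire_labels), pl.1.1 ∈ wire_labels.map Prod.fst := by
    intro pl hpl
    rw [List.nil_append] at hpl
    exact hcols _ (flatL_cols _ _ hpl)
  simp only [build_sigma_map_alt]
  rw [show (pyCOLUMNS.foldl (fun st col =>
      (PySem.List.enumerate ((PySem.Dict.mk wire_labels).getD col [])).foldl (fun st rl =>
        match st.2.2.get? rl.2 with
        | some q =>
            (st.1.modify q.1 [] (fun rowL => rowL.set q.2.toNat (col, rl.1)),
             st.2.1, st.2.2.insert rl.2 (col, rl.1))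
        | none =>
            (st.1, st.2.1.insert rl.2 (col, rl.1), st.2.2.insert rl.2 (col, rl.1))) st)
      (PySem.Dict.mk (wire_labels.map (fun p =>
        (p.1, List.replicate p.2.length (("", 0) : String × Int)))),
       (PySem.Dict.empty : PySem.Dict String (String × Int)),
       (PySem.Dict.empty : PySem.Dict String (String × Int))))
      = (flatL (PySem.Dict.mk wire_labels)).foldl stepB
          (PySem.Dict.mk (wire_labels.map (fun p =>
            (p.1, List.replicate p.2.length (("", 0) : String × Int)))),
           (PySem.Dict.empty : PySem.Dict String (String × Int)),
           (PySem.Dict.empty : PySem.Dict String (String × Int))) by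
    unfold flatL
    rw [List.foldl_flatMap]
    simp only [List.foldl_map]
    rfl]
  obtain ⟨h1, h2, h3, h4⟩ := B_inv (flatL (PySem.Dict.mk wire_labels)) []
    (PySem.Dict.mk (wire_labels.map (fun p =>
      (p.1, List.replicate p.2.length (("", 0) : String × Int)))))
    PySem.Dict.empty PySem.Dict.empty []
    (wire_labels.map (fun p => (p.1, List.replicate p.2.length (("", 0) : String × Int))))
    (wire_labels.map Prod.fst)
    rfl rfl rfl hk0 hnd hcolsF
  rw [List.nil_append] at h3 h4
  rw [List.nil_append] at h1
  rw [h3, h4]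
  rw [show (pvPrevD (flatL (PySem.Dict.mk wire_labels))).items
      = (labsOf (flatL (PySem.Dict.mk wire_labels))).map
          (fun l => (l, (occof (flatL (PySem.Dict.mk wire_labels)) l).getLastD ("", 0)))
      from rfl]
  rw [List.foldl_map]
  show (List.foldl (fun acc l =>
      acc.modify ((occof (flatL (PySem.Dict.mk wire_labels)) l).getLastD ("", 0)).1 []
        (fun rowL => rowL.set
          ((occof (flatL (PySem.Dict.mk wire_labels)) l).getLastD ("", 0)).2.toNat
          ((pvFirstD (flatL (PySem.Dict.mk wire_labels))).getD l ("", 0))))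
      ((flatL (PySem.Dict.mk wire_labels)).foldl stepB
        (PySem.Dict.mk (wire_labels.map (fun p =>
          (p.1, List.replicate p.2.length (("", 0) : String × Int)))),
         PySem.Dict.empty, PySem.Dict.empty)).1
      (labsOf (flatL (PySem.Dict.mk wire_labels)))).items = _
  rw [PySem.List.foldl_congr_mem _ _
    (fun (acc : PySem.Dict String (List (String × Int))) l =>
      acc.modify ((occof (flatL (PySem.Dict.mk wire_labels)) l).getLastD ("", 0)).1 []
        (fun rowL => rowL.set
          ((occof (flatL (PySem.Dict.mk wire_labels)) l).getLastD ("", 0)).2.toNat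
          ((occof (flatL (PySem.Dict.mk wire_labels)) l).headD ("", 0)))) _
    (fun acc l hl => by rw [getD_pvFirstD hl])]
  have hwrap : (wrapL (flatL (PySem.Dict.mk wire_labels))).foldl
      (fun (σ : PySem.Dict String (List (String × Int))) e =>
        σ.modify e.1.1 [] (fun rowL => rowL.set e.1.2.toNat e.2))
      ((flatL (PySem.Dict.mk wire_labels)).foldl stepB
        (PySem.Dict.mk (wire_labels.map (fun p =>
          (p.1, List.replicate p.2.length (("", 0) : String × Int)))),
         PySem.Dict.empty, PySem.Dict.empty)).1
      = (labsOf (flatL (PySem.Dict.mk wire_labels))).foldl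
        (fun (acc : PySem.Dict String (List (String × Int))) l =>
          acc.modify ((occof (flatL (PySem.Dict.mk wire_labels)) l).getLastD ("", 0)).1 []
            (fun rowL => rowL.set
              ((occof (flatL (PySem.Dict.mk wire_labels)) l).getLastD ("", 0)).2.toNat
              ((occof (flatL (PySem.Dict.mk wire_labels)) l).headD ("", 0))))
        ((flatL (PySem.Dict.mk wire_labels)).foldl stepB
          (PySem.Dict.mk (wire_labels.map (fun p =>
            (p.1, List.replicate p.2.length (("", 0) : String × Int)))),
           PySem.Dict.empty, PySem.Dict.empty)).1 := by
    unfold wrapL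
    rw [List.foldl_map]
  rw [← hwrap]
  have hsubw : ∀ e ∈ wrapL (flatL (PySem.Dict.mk wire_labels)),
      e.1.1 ∈ ((flatL (PySem.Dict.mk wire_labels)).foldl stepB
        (PySem.Dict.mk (wire_labels.map (fun p =>
          (p.1, List.replicate p.2.length (("", 0) : String × Int)))),
         PySem.Dict.empty, PySem.Dict.empty)).1.keys := by
    intro e he
    obtain ⟨l, hl, hel⟩ := List.mem_map.1 he
    have hq : (occof (flatL (PySem.Dict.mk wire_labels)) l).getLastD ("", 0)
        ∈ occof (flatL (PySem.Dict.mk wire_labels)) l := getLastD_mem (occof_ne_nil hl) _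
    have hmemF : ((occof (flatL (PySem.Dict.mk wire_labels)) l).getLastD ("", 0), l)
        ∈ flatL (PySem.Dict.mk wire_labels) := mem_occof.1 hq
    have hcp := flatL_cols _ _ hmemF
    rw [h2, ← hel]
    exact hcols _ hcp
  have hndw : ((flatL (PySem.Dict.mk wire_labels)).foldl stepB
      (PySem.Dict.mk (wire_labels.map (fun p =>
        (p.1, List.replicate p.2.length (("", 0) : String × Int)))),
       PySem.Dict.empty, PySem.Dict.empty)).1.keys.Nodup := by
    rw [h2]; exact hnd
  rw [(foldl_modify_items (wrapL (flatL (PySem.Dict.mk wire_labels))) _ hndw hsubw).1, h1]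
  rw [show applyE (applyE (wire_labels.map (fun p =>
      (p.1, List.replicate p.2.length (("", 0) : String × Int))))
        (esOf [] (flatL (PySem.Dict.mk wire_labels))))
      (wrapL (flatL (PySem.Dict.mk wire_labels)))
      = applyE (wire_labels.map (fun p =>
          (p.1, List.replicate p.2.length (("", 0) : String × Int))))
        (esOf [] (flatL (PySem.Dict.mk wire_labels))
          ++ wrapL (flatL (PySem.Dict.mk wire_labels))) by
    unfold applyE
    rw [List.foldl_append]]
  have hp0 : (esOf [] (flatL (PySem.Dict.mk wire_labels))).Perm
      (groupedL (flatL (PySem.Dict.mk wire_labels))) := by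
    have hge := grouped_esOf (flatL (PySem.Dict.mk wire_labels)) []
    simpa using hge
  have hperm : (esOf [] (flatL (PySem.Dict.mk wire_labels))
        ++ wrapL (flatL (PySem.Dict.mk wire_labels))).Perm
      (groupedL (flatL (PySem.Dict.mk wire_labels))
        ++ wrapL (flatL (PySem.Dict.mk wire_labels))) := hp0.append_right _
  have hnodup : ((esOf [] (flatL (PySem.Dict.mk wire_labels))
        ++ wrapL (flatL (PySem.Dict.mk wire_labels))).map (fun e => pvKey e.1)).Nodup := by
    have hp2 := hperm.trans (LA_perm (PySem.Dict.mk wire_labels)).symm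
    exact (hp2.map _).nodup_iff.2 (LA_nodup _)
  exact applyE_perm _ hperm hnodup

-- ===== VERDICT (by name: the statement is the Claim_ definition above) =====
theorem build_sigma_map_spec : Claim_equal_build_sigma_map := by
  intro wire_labels _hdom hpre
  unfold Spec_build_sigma_map
  rw [sideA wire_labels hpre, sideB wire_labels hpre]
  exact applyE_perm _ (LA_perm _) (LA_nodup _)
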